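-- pv_equiv track=rewrite | github.com/ark2016/VK-Technopark-project-2024 | data_mining/tests/functions/file_141_160.py | find_odd_and_not_prime
-- ===== SOURCE A (Python) =====
-- def find_odd_and_not_prime(lst):
--     def is_prime(n):
--         if n < 2:
--             return False
--         for i in range(2, int(n ** 0.5) + 1):
--             if n % i == 0:
--                 return False
--         return True
--     non_prime_odd = []
--     for num in lst:
--         if num % 2 != 0 and not is_prime(num):
--             non_prime_odd.append(num)
--     return non_prime_odd
-- ===== SOURCE B (Python) =====
-- def find_odd_and_not_prime(lst):
--     odds = [n for n in lst if n % 2 != 0]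
--     m = max(odds, default=0)
--     # largest L with L*L <= m (integer sqrt of m; 0 if m < 1)
--     L = 0
--     while (L + 1) * (L + 1) <= m:
--         L += 1
--     # sieve of Eratosthenes: prime table up to L, shared by all elements
--     is_comp = [False] * (L + 1)
--     primes = []
--     for p in range(2, L + 1):
--         if not is_comp[p]:
--             primes.append(p)
--             for q in range(p * p, L + 1, p):
--                 is_comp[q] = True
--
--     def is_prime(n):
--         if n < 2:
--             return False
--         for p in primes:
--             if p * p > n:
--                 break
--             if n % p == 0:
--                 return False
--         return True
--
--     return [n for n in odds if not is_prime(n)]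
-- ===== Notes on version B (the rewrite author's own statement) =====
-- stated objective: alternative
-- what changed: B replaces A's per-element trial division by every integer up to sqrt(n) with a staged pipeline: filter the odds, build a sieve-of-Eratosthenes prime table up to isqrt(max(odds)) once per call, then classify each element by dividing only by the tabulated primes (with an early break once p*p > n).
import Mathlib
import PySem

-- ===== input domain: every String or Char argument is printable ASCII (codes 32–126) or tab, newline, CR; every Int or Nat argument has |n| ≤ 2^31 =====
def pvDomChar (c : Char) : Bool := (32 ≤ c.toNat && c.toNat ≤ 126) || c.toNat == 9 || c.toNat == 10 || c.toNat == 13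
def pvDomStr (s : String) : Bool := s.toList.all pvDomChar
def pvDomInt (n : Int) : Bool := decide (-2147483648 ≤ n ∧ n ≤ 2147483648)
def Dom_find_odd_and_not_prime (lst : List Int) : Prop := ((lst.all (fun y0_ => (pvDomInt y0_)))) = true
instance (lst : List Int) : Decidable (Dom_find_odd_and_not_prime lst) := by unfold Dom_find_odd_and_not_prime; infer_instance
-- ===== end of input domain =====

-- B restructures A: it filters the odds first, builds a sieve-of-Eratosthenes prime
-- table up to isqrt(max) ONCE per call, and tests each element by dividing only by
-- the tabulated primes (A trial-divides every element by every integer up to its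
-- square root).


-- ===== PORT A =====
-- the 'for i in range(2, int(n**0.5)+1)' loop with early return False
def pvTrialA (n : Int) : List Int → Bool
  | [] => true
  | i :: rest => if PySem.Int.mod n i == 0 then false else pvTrialA n rest

-- int(n ** 0.5) = Nat.sqrt n.toNat for 0 ≤ n ≤ 2^31 (float sqrt is exact there); n < 2 returns first
def pvIsPrimeA (n : Int) : Bool :=
  if n < 2 then false
  else pvTrialA n (PySem.List.pyRange 2 ((Nat.sqrt n.toNat : Int) + 1) 1)

def find_odd_and_not_prime (lst : List Int) : List Int :=
  lst.foldl (fun acc num =>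
    if PySem.Int.mod num 2 != 0 && !pvIsPrimeA num then acc ++ [num] else acc) []

-- ===== PORT B =====
-- Source B's 'while (L+1)*(L+1) <= m: L += 1' loop
def pvLimit (m L : Int) : Int :=
  if _h : (L + 1) * (L + 1) ≤ m then pvLimit m (L + 1) else L
termination_by (m - L).toNat
decreasing_by
  have : L < m := by nlinarith [sq_nonneg (2 * L + 1)]
  omega

-- body of Source B's sieve loop over p (indices p, q are ≥ 2 here, so .toNat is exact)
def pvSieveStep (L : Int) (st : List Int × List Bool) (p : Int) : List Int × List Bool :=
  if st.2.getD p.toNat false then st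
  else (st.1 ++ [p],
        (PySem.List.pyRange (p * p) (L + 1) p).foldl (fun c q => c.set q.toNat true) st.2)

-- Source B's sieve: is_comp = [False]*(L+1); for p in range(2, L+1): …
def pvSieve (L : Int) : List Int × List Bool :=
  (PySem.List.pyRange 2 (L + 1) 1).foldl (pvSieveStep L) ([], List.replicate (L + 1).toNat false)

-- Source B's 'for p in primes: if p*p > n: break; if n % p == 0: return False' loop
def pvTryPrimes (n : Int) : List Int → Bool
  | [] => true
  | p :: rest =>
    if p * p > n then true
    else if PySem.Int.mod n p == 0 then false
    else pvTryPrimes n rest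

def pvIsPrimeB (primes : List Int) (n : Int) : Bool :=
  if n < 2 then false else pvTryPrimes n primes

def find_odd_and_not_prime_alt (lst : List Int) : List Int :=
  let odds := lst.filter (fun n => PySem.Int.mod n 2 != 0)
  let m := (PySem.List.max? odds (fun x => x)).getD 0
  let L := pvLimit m 0
  let primes := (pvSieve L).1
  odds.filter (fun n => !pvIsPrimeB primes n)

-- ===== PRECONDITION & SPEC =====
def Spec_find_odd_and_not_prime (lst : List Int) (out : List Int) : Prop := out = find_odd_and_not_prime_alt lst
instance (lst : List Int) (out : List Int) : Decidable (Spec_find_odd_and_not_prime lst out) := by unfold Spec_find_odd_and_not_prime; infer_instance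

-- ===== CLAIM (what is proved, stated in full; the proofs are below) =====
def Claim_equal_find_odd_and_not_prime : Prop := ∀ (lst : List Int), Dom_find_odd_and_not_prime lst → Spec_find_odd_and_not_prime lst (find_odd_and_not_prime lst)

-- ===== LEMMAS AND PROOFS =====

-- "n has no divisor m with 2 ≤ m and m*m ≤ n" — the characterisation both tests meet
def pvNoSmallDiv (n : Int) : Prop := ∀ m : Int, 2 ≤ m → m * m ≤ n → ¬ m ∣ n

-- "r has a proper divisor ≥ 2"
def pvHasFac (r : Int) : Prop := ∃ d : Int, 2 ≤ d ∧ d < r ∧ d ∣ r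

lemma pvTrialA_iff (n : Int) (l : List Int) :
    pvTrialA n l = true ↔ ∀ i ∈ l, PySem.Int.mod n i ≠ 0 := by
  induction l with
  | nil => simp [pvTrialA]
  | cons i rest ih =>
    simp only [pvTrialA, List.mem_cons]
    by_cases h : PySem.Int.mod n i = 0 <;> simp [h, ih]

lemma pvIsPrimeA_iff (n : Int) : pvIsPrimeA n = true ↔ 2 ≤ n ∧ pvNoSmallDiv n := by
  unfold pvIsPrimeA
  by_cases hn : n < 2
  · simp only [if_pos hn, Bool.false_eq_true, false_iff, not_and]
    intro h; omega
  · replace hn : 2 ≤ n := by omega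
    have hnn : (n.toNat : Int) = n := Int.toNat_of_nonneg (by omega)
    simp only [if_neg (by omega : ¬ n < 2), pvTrialA_iff]
    constructor
    · intro h
      refine ⟨hn, fun m hm hmm hdvd => ?_⟩
      have hmn : (m.toNat : Int) = m := Int.toNat_of_nonneg (by omega)
      have hle : m.toNat * m.toNat ≤ n.toNat := by
        zify; rw [hmn, hnn]; exact hmm
      have hms : m.toNat ≤ Nat.sqrt n.toNat := Nat.le_sqrt.mpr hle
      have := h m (PySem.List.mem_pyRange_one.mpr ⟨hm, by omega⟩)
      exact this ((PySem.Int.mod_eq_zero_iff_dvd n m).mpr hdvd)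
    · rintro ⟨-, H⟩ m hmem
      obtain ⟨hm2, hmlt⟩ := PySem.List.mem_pyRange_one.mp hmem
      intro h0
      have hdvd := (PySem.Int.mod_eq_zero_iff_dvd n m).mp h0
      have hmn : (m.toNat : Int) = m := Int.toNat_of_nonneg (by omega)
      have hms : m.toNat ≤ Nat.sqrt n.toNat := by omega
      have h1 : m.toNat * m.toNat ≤ n.toNat :=
        le_trans (Nat.mul_le_mul hms hms)
          (by simpa [pow_two] using Nat.sqrt_le' n.toNat)
      have hmm : m * m ≤ n := by
        have : ((m.toNat * m.toNat : Nat) : Int) ≤ ((n.toNat : Nat) : Int) :=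
          Int.ofNat_le.mpr h1
        push_cast at this
        rw [hmn, hnn] at this
        exact this
      exact H m hm2 hmm hdvd

-- pvLimit m 0 is ≥ 0 and its successor's square exceeds m
lemma pvLimit_spec (m : Int) : ∀ L, 0 ≤ L →
    0 ≤ pvLimit m L ∧ m < (pvLimit m L + 1) * (pvLimit m L + 1) := by
  intro L
  induction L using pvLimit.induct (m := m) with
  | case1 L h ih =>
    intro hL
    rw [pvLimit, dif_pos h]
    exact ih (by omega)
  | case2 L h =>
    intro hL
    rw [pvLimit, dif_neg h]
    exact ⟨hL, not_le.mp h⟩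

-- marking pass: a cell true after the fold was true before or is an index of the range
lemma pvMark_sound (qs : List Int) (c : List Bool) (j : Nat) :
    (qs.foldl (fun c q => c.set q.toNat true) c).getD j false = true →
    c.getD j false = true ∨ ∃ q ∈ qs, q.toNat = j := by
  induction qs generalizing c with
  | nil => intro h; exact Or.inl h
  | cons q qs ih =>
    intro h
    rcases ih (c.set q.toNat true) h with h' | ⟨q', hq', hj⟩
    · rw [List.getD_eq_getElem?_getD, List.getElem?_set] at h'
      by_cases he : q.toNat = j
      · exact Or.inr ⟨q, List.mem_cons_self .., he⟩
      · rw [if_neg he] at h'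
        exact Or.inl (by rw [List.getD_eq_getElem?_getD]; exact h')
    · exact Or.inr ⟨q', List.mem_cons_of_mem _ hq', hj⟩

-- the sieve-loop invariant
def pvInv (a : Int) (st : List Int × List Bool) : Prop :=
  (∀ p ∈ st.1, 2 ≤ p ∧ p < a) ∧
  st.1.Pairwise (· < ·) ∧
  (∀ j : Nat, st.2.getD j false = true → pvHasFac (j : Int)) ∧
  (∀ r : Int, 2 ≤ r → r < a → ¬ pvHasFac r → r ∈ st.1)

-- one step of the outer sieve loop preserves the invariant
lemma pvInv_step (L a : Int) (st : List Int × List Bool) (h2 : 2 ≤ a)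
    (hInv : pvInv a st) : pvInv (a + 1) (pvSieveStep L st a) := by
  obtain ⟨hmem, hpw, hcomp, hfull⟩ := hInv
  unfold pvSieveStep
  by_cases hc : st.2.getD a.toNat false = true
  · rw [if_pos hc]
    refine ⟨fun p hp => ⟨(hmem p hp).1, by have := (hmem p hp).2; omega⟩, hpw, hcomp, ?_⟩
    intro r hr2 hra hnf
    rcases (by omega : r < a ∨ r = a) with h | rfl
    · exact hfull r hr2 h hnf
    · have := hcomp r.toNat hc
      rw [Int.toNat_of_nonneg (by omega)] at this
      exact absurd this hnf
  · rw [if_neg hc]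
    refine ⟨?_, ?_, ?_, ?_⟩
    · intro p hp
      rcases List.mem_append.mp hp with h | h
      · exact ⟨(hmem p h).1, by have := (hmem p h).2; omega⟩
      · rw [List.mem_singleton.mp h]; exact ⟨h2, by omega⟩
    · rw [List.pairwise_append]
      exact ⟨hpw, List.pairwise_singleton _ _,
        fun x hx y hy => by rw [List.mem_singleton.mp hy]; exact (hmem x hx).2⟩
    · intro j hj
      rcases pvMark_sound _ _ _ hj with h | ⟨q, hq, hjq⟩
      · exact hcomp j h
      · obtain ⟨hq1, hq2, hq3⟩ := (PySem.List.mem_pyRange_iff_of_pos (by omega) q).mp hq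
        have hqa : a * a ≤ q := hq1
        have hq0 : a < q := by nlinarith
        have hdvd : a ∣ q := by
          have h2' : a ∣ a * a := Dvd.intro a rfl
          simpa using dvd_add hq3 h2' 
        have hjq' : (j : Int) = q := by rw [← hjq, Int.toNat_of_nonneg (by nlinarith)]
        exact ⟨a, h2, by omega, by rw [hjq']; exact hdvd⟩
    · intro r hr2 hra hnf
      rcases (by omega : r < a ∨ r = a) with h | rfl
      · exact List.mem_append_left _ (hfull r hr2 h hnf)
      · exact List.mem_append_right _ (List.mem_singleton.mpr rfl)

-- the invariant carried over the outer fold from a to L+1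
lemma pvSieve_go (L : Int) : ∀ a st, 2 ≤ a → pvInv a st →
    (∀ p ∈ ((PySem.List.pyRange a (L + 1) 1).foldl (pvSieveStep L) st).1, 2 ≤ p) ∧
    ((PySem.List.pyRange a (L + 1) 1).foldl (pvSieveStep L) st).1.Pairwise (· < ·) ∧
    (∀ r : Int, 2 ≤ r → r ≤ L → ¬ pvHasFac r →
      r ∈ ((PySem.List.pyRange a (L + 1) 1).foldl (pvSieveStep L) st).1) := by
  suffices H : ∀ (fuel : Nat) (a : Int) (st : List Int × List Bool), (L + 1 - a).toNat ≤ fuel →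
      2 ≤ a → pvInv a st →
      (∀ p ∈ ((PySem.List.pyRange a (L + 1) 1).foldl (pvSieveStep L) st).1, 2 ≤ p) ∧
      ((PySem.List.pyRange a (L + 1) 1).foldl (pvSieveStep L) st).1.Pairwise (· < ·) ∧
      (∀ r : Int, 2 ≤ r → r ≤ L → ¬ pvHasFac r →
        r ∈ ((PySem.List.pyRange a (L + 1) 1).foldl (pvSieveStep L) st).1) by
    exact fun a st h hi => H (L + 1 - a).toNat a st le_rfl h hi
  intro fuel
  induction fuel with
  | zero =>
    intro a st hf h2 hInv
    have ha : L + 1 ≤ a := by omega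
    rw [PySem.List.pyRange_one_eq_nil ha]
    exact ⟨fun p hp => (hInv.1 p hp).1, hInv.2.1,
      fun r hr2 hrL hnf => hInv.2.2.2 r hr2 (by omega) hnf⟩
  | succ fuel ih =>
    intro a st hf h2 hInv
    by_cases ha : L + 1 ≤ a
    · rw [PySem.List.pyRange_one_eq_nil ha]
      exact ⟨fun p hp => (hInv.1 p hp).1, hInv.2.1,
        fun r hr2 hrL hnf => hInv.2.2.2 r hr2 (by omega) hnf⟩
    · rw [PySem.List.pyRange_one_cons (by omega), List.foldl_cons]
      exact ih (a + 1) (pvSieveStep L st a) (by omega) (by omega)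
        (pvInv_step L a st h2 hInv)

lemma pvSieve_spec (L : Int) :
    (∀ p ∈ (pvSieve L).1, 2 ≤ p) ∧ (pvSieve L).1.Pairwise (· < ·) ∧
    (∀ r : Int, 2 ≤ r → r ≤ L → ¬ pvHasFac r → r ∈ (pvSieve L).1) := by
  have h0 : pvInv 2 (([] : List Int), List.replicate (L + 1).toNat false) := by
    refine ⟨fun p hp => absurd hp (List.not_mem_nil), List.Pairwise.nil, ?_, ?_⟩
    · intro j hj
      rw [List.getD_eq_getElem?_getD, List.getElem?_replicate] at hj
      split at hj <;> simp_all
    · intro r hr2 hra _; omega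
  exact pvSieve_go L 2 _ le_rfl h0

lemma pvTryPrimes_false_iff (n : Int) (ps : List Int)
    (h2 : ∀ p ∈ ps, 2 ≤ p) (hs : ps.Pairwise (· < ·)) :
    pvTryPrimes n ps = false ↔ ∃ p ∈ ps, p * p ≤ n ∧ p ∣ n := by
  induction ps with
  | nil => simp [pvTryPrimes]
  | cons p rest ih =>
    rw [List.pairwise_cons] at hs
    have hp2 : 2 ≤ p := h2 p (List.mem_cons_self ..)
    unfold pvTryPrimes
    by_cases hbig : p * p > n
    · rw [if_pos hbig]
      simp only [Bool.true_eq_false, false_iff]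
      rintro ⟨q, hq, hqn, -⟩
      rcases List.mem_cons.mp hq with rfl | hq
      · omega
      · have hpq : p < q := hs.1 q hq
        have hq2 : 2 ≤ q := h2 q (List.mem_cons_of_mem _ hq)
        nlinarith
    · rw [if_neg hbig]
      by_cases hmod : PySem.Int.mod n p = 0
      · rw [if_pos (by simpa using hmod)]
        exact ⟨fun _ => ⟨p, List.mem_cons_self .., by omega,
          (PySem.Int.mod_eq_zero_iff_dvd n p).mp hmod⟩, fun _ => rfl⟩
      · rw [if_neg (by simpa using hmod)]
        rw [ih (fun q hq => h2 q (List.mem_cons_of_mem _ hq)) hs.2]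
        constructor
        · rintro ⟨q, hq, h1, h2⟩; exact ⟨q, List.mem_cons_of_mem _ hq, h1, h2⟩
        · rintro ⟨q, hq, hq1, hq2⟩
          rcases List.mem_cons.mp hq with rfl | hq
          · exact absurd ((PySem.Int.mod_eq_zero_iff_dvd n q).mpr hq2) hmod
          · exact ⟨q, hq, hq1, hq2⟩

-- per-element agreement, for any n bounded by the value m the table was built for
lemma pvIsPrime_agree (m n : Int) (hnm : n ≤ m) :
    pvIsPrimeB (pvSieve (pvLimit m 0)).1 n = pvIsPrimeA n := by
  by_cases hn : n < 2
  · have : pvIsPrimeA n = false := by unfold pvIsPrimeA; rw [if_pos hn]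
    rw [this]; unfold pvIsPrimeB; rw [if_pos hn]
  · replace hn : 2 ≤ n := by omega
    obtain ⟨hL0, hLm⟩ := pvLimit_spec m 0 le_rfl
    obtain ⟨hp2, hppw, hpfull⟩ := pvSieve_spec (pvLimit m 0)
    set L := pvLimit m 0 with hLdef
    set ps := (pvSieve L).1 with hpsdef
    unfold pvIsPrimeB
    rw [if_neg (by omega)]
    rw [Bool.eq_iff_iff, pvIsPrimeA_iff]
    constructor
    · intro htrue
      refine ⟨hn, fun d hd2 hdd hdvd => ?_⟩
      -- take the least divisor of n that is ≥ 2; it is in the sieve table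
      have hS : ∃ k : Nat, 2 ≤ k ∧ (k : Int) ∣ n := ⟨d.toNat, by omega,
        by rwa [Int.toNat_of_nonneg (by omega)]⟩
      classical
      set r := Nat.find hS with hrdef
      obtain ⟨hr2, hrdvd⟩ := Nat.find_spec hS
      have hrmin : ∀ k, k < r → ¬ (2 ≤ k ∧ (k : Int) ∣ n) := fun k hk => Nat.find_min hS hk
      have hrd : r ≤ d.toNat := Nat.find_min' hS ⟨by omega, by rwa [Int.toNat_of_nonneg (by omega)]⟩
      have hrdI : (r : Int) ≤ d := by omega
      have hrr : (r : Int) * r ≤ n := by nlinarith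
      have hrL : (r : Int) ≤ L := by nlinarith
      have hrnf : ¬ pvHasFac (r : Int) := by
        rintro ⟨e, he2, helt, hedvd⟩
        have : (e.toNat : Int) = e := Int.toNat_of_nonneg (by omega)
        exact hrmin e.toNat (by omega) ⟨by omega, by rw [this]; exact hedvd.trans hrdvd⟩
      have hrmem : (r : Int) ∈ ps := hpfull r (by omega) hrL hrnf
      have hfalse : pvTryPrimes n ps = false :=
        (pvTryPrimes_false_iff n ps hp2 hppw).mpr ⟨r, hrmem, hrr, hrdvd⟩
      rw [htrue] at hfalse; cases hfalse
    · rintro ⟨-, hnsd⟩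
      by_contra htrue
      have hfalse : pvTryPrimes n ps = false := by
        cases h : pvTryPrimes n ps
        · rfl
        · exact absurd h htrue
      obtain ⟨p, hpmem, hpp, hpdvd⟩ := (pvTryPrimes_false_iff n ps hp2 hppw).mp hfalse
      exact hnsd p (hp2 p hpmem) hpp hpdvd

-- ===== VERDICT (by name: the statement is the Claim_ definition above) =====
theorem find_odd_and_not_prime_spec : Claim_equal_find_odd_and_not_prime := by
  intro lst _
  unfold Spec_find_odd_and_not_prime find_odd_and_not_prime find_odd_and_not_prime_alt
  rw [PySem.List.foldl_append_if_eq_filter]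
  simp only [List.nil_append, List.filter_filter]
  apply List.filter_congr
  intro x hx
  by_cases hodd : PySem.Int.mod x 2 = 0
  · have h0 : x % 2 = 0 := by rwa [← PySem.Int.mod_eq_emod_of_pos (by norm_num)]
    simp [h0]
  · have hodd' : ¬ x % 2 = 0 := by rwa [← PySem.Int.mod_eq_emod_of_pos (by norm_num)]
    have hxodds : x ∈ lst.filter (fun n => PySem.Int.mod n 2 != 0) :=
      List.mem_filter.mpr ⟨hx, by simpa using hodd⟩
    obtain ⟨mx, hmx⟩ : ∃ mx, PySem.List.max? (lst.filter (fun n => PySem.Int.mod n 2 != 0)) (fun x => x) = some mx := by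
      cases h : PySem.List.max? (lst.filter (fun n => PySem.Int.mod n 2 != 0)) (fun x => x) with
      | none => rw [PySem.List.max?_eq_none_iff] at h; rw [h] at hxodds; cases hxodds
      | some v => exact ⟨v, rfl⟩
    have hle : x ≤ mx := PySem.List.max?_isMax hmx x hxodds
    rw [hmx]
    simp only [Option.getD_some]
    rw [pvIsPrime_agree mx x hle]
    rw [Bool.and_comm]
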